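-- pv_equiv track=rewrite | github.com/uclasystem/bamboo | external/deepspeed/deepspeed/runtime/pipe/redundancy.py | get_redundant_user_stage_ids
-- ===== SOURCE A (Python) =====
-- from typing import List, Optional
--
-- def get_redundant_stage_ids(
--         redundant_level, stage_id, num_stages) -> List[int]:
--     """ Get stages that stored a redundant copy on `stage_id` """
--     if redundant_level == 0:
--         return []
--
--     stage_ids = []
--     r_stage_id = stage_id
--     for _ in range(redundant_level):
--         r_stage_id = (r_stage_id + 1) % num_stages
--         stage_ids.append(r_stage_id)
--
--     return stage_ids
--
-- def get_redundant_user_stage_ids(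
--         redundant_level, stage_id, num_stages) -> List[int]:
--     """ Get stages that stored a redundant copy of `stage_id` """
--     stage_ids = []
--     for i in range(num_stages):
--         redundant_stage_ids = get_redundant_stage_ids(
--             redundant_level, i, num_stages)
--         if stage_id in redundant_stage_ids:
--             stage_ids.append(i)
--     return stage_ids
-- ===== SOURCE B (Python) =====
-- def get_redundant_user_stage_ids(redundant_level, stage_id, num_stages):
--     # O(num_stages): stage i holds a redundant copy of stage_id iff the cyclic
--     # forward distance from i to stage_id (n if zero) is at most redundant_level.
--     if num_stages <= 0 or not (0 <= stage_id < num_stages):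
--         return []
--     out = []
--     for i in range(num_stages):
--         d = (stage_id - i) % num_stages
--         if (d if d else num_stages) <= redundant_level:
--             out.append(i)
--     return out
-- ===== Notes on version B (the rewrite author's own statement) =====
-- stated objective: faster
-- what changed: Instead of rebuilding each candidate stage's full redundant list (an inner O(redundant_level) loop plus a linear membership scan), B tests each stage i in O(1) by comparing the cyclic forward distance (stage_id - i) % num_stages (n when zero) against redundant_level, after an up-front range check on stage_id.
import Mathlib
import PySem

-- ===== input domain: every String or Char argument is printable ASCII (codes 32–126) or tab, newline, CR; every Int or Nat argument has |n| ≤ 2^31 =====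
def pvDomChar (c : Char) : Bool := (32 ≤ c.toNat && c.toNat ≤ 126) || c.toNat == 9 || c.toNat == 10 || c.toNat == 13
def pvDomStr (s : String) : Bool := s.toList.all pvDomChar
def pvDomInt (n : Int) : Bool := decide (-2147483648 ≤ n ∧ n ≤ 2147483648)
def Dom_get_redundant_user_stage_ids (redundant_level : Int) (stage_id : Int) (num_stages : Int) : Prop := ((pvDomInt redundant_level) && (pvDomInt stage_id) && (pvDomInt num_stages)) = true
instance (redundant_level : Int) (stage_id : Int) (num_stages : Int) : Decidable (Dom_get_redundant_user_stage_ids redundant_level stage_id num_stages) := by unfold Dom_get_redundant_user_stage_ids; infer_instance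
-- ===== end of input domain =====

-- B replaces A's inner O(redundant_level) list rebuild + linear membership scan by an
-- O(1) cyclic-distance test per stage (objective: faster, O(n·L) → O(n)).

-- ===== PORT A =====
def get_redundant_stage_ids (redundant_level : Int) (stage_id : Int) (num_stages : Int) : List Int :=
  if redundant_level = 0 then []
  else
    let st := (PySem.List.pyRange 0 redundant_level 1).foldl
      (fun (st : List Int × Int) _ =>
        let r := PySem.Int.mod (st.2 + 1) num_stages
        (st.1 ++ [r], r)) ([], stage_id)
    st.1

def get_redundant_user_stage_ids (redundant_level : Int) (stage_id : Int) (num_stages : Int) : List Int :=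
  (PySem.List.pyRange 0 num_stages 1).foldl
    (fun acc i =>
      let redundant_stage_ids := get_redundant_stage_ids redundant_level i num_stages
      if stage_id ∈ redundant_stage_ids then acc ++ [i] else acc) []

-- ===== PORT B =====
def get_redundant_user_stage_ids_alt (redundant_level : Int) (stage_id : Int) (num_stages : Int) : List Int :=
  if num_stages ≤ 0 ∨ ¬ (0 ≤ stage_id ∧ stage_id < num_stages) then []
  else
    (PySem.List.pyRange 0 num_stages 1).foldl
      (fun acc i =>
        let d := PySem.Int.mod (stage_id - i) num_stages
        if (if d = 0 then num_stages else d) ≤ redundant_level then acc ++ [i] else acc) []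

-- ===== PRECONDITION & SPEC =====
def Spec_get_redundant_user_stage_ids (redundant_level : Int) (stage_id : Int) (num_stages : Int) (out : List Int) : Prop := out = get_redundant_user_stage_ids_alt redundant_level stage_id num_stages
instance (redundant_level : Int) (stage_id : Int) (num_stages : Int) (out : List Int) : Decidable (Spec_get_redundant_user_stage_ids redundant_level stage_id num_stages out) := by unfold Spec_get_redundant_user_stage_ids; infer_instance

-- ===== CLAIM (what is proved, stated in full; the proofs are below) =====
def Claim_equal_get_redundant_user_stage_ids : Prop := ∀ (redundant_level : Int) (stage_id : Int) (num_stages : Int), Dom_get_redundant_user_stage_ids redundant_level stage_id num_stages → Spec_get_redundant_user_stage_ids redundant_level stage_id num_stages (get_redundant_user_stage_ids redundant_level stage_id num_stages)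

-- ===== LEMMAS AND PROOFS =====

-- proof-only model of A's inner loop output
def gInner (num_stages : Int) : Nat → Int → List Int
  | 0, _ => []
  | m + 1, r =>
    let r' := PySem.Int.mod (r + 1) num_stages
    r' :: gInner num_stages m r'

theorem foldl_inner_eq (n : Int) (l : List Int) (acc : List Int) (r : Int) :
    (l.foldl (fun (st : List Int × Int) _ =>
        let r' := PySem.Int.mod (st.2 + 1) n
        (st.1 ++ [r'], r')) (acc, r)).1 = acc ++ gInner n l.length r := by
  induction l generalizing acc r with
  | nil => simp [gInner]
  | cons x xs ih => simp [gInner, ih, List.append_assoc]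

theorem inner_eq_g (L i n : Int) :
    get_redundant_stage_ids L i n = gInner n L.toNat i := by
  unfold get_redundant_stage_ids
  by_cases hL : L = 0
  · simp [hL, gInner]
  · simp only [if_neg hL]
    have := foldl_inner_eq n (PySem.List.pyRange 0 L 1) [] i
    simpa [PySem.List.length_pyRange_one] using this

theorem g_eq_map (n : Int) (hn : 0 < n) (m : Nat) (r : Int) :
    gInner n m r = (List.range m).map (fun j : Nat => (r + (j : Int) + 1) % n) := by
  induction m generalizing r with
  | zero => simp [gInner]
  | succ m ih =>
    rw [List.range_succ_eq_map]
    simp only [List.map_cons, List.map_map]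
    simp only [gInner, ih]
    congr 1
    · rw [PySem.Int.mod_eq_emod_of_pos hn]; norm_num
    · apply List.map_congr_left
      intro j _
      simp only [Function.comp]
      rw [PySem.Int.mod_eq_emod_of_pos hn]
      push_cast
      have hmm : ∀ a b : Int, (a % n + b) % n = (a + b) % n := fun a b => by
        rw [Int.add_emod, Int.emod_emod_of_dvd _ dvd_rfl, ← Int.add_emod]
      calc ((r + 1) % n + (j : Int) + 1) % n
          = ((r + 1) % n + ((j : Int) + 1)) % n := by ring_nf
        _ = ((r + 1) + ((j : Int) + 1)) % n := hmm _ _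
        _ = (r + ((j : Int) + 1) + 1) % n := by ring_nf

theorem mem_g_iff (n s : Int) (hn : 0 < n) (m : Nat) (r : Int) :
    s ∈ gInner n m r ↔ ∃ j < m, s = (r + (j : Int) + 1) % n := by
  rw [g_eq_map n hn m r]
  simp only [List.mem_map, List.mem_range]
  exact ⟨fun ⟨j, hj, h⟩ => ⟨j, hj, h.symm⟩, fun ⟨j, hj, h⟩ => ⟨j, hj, h.symm⟩⟩

theorem key_iff (n s i L : Int) (hn : 0 < n) (hs0 : 0 ≤ s) (hsn : s < n) :
    (∃ j < L.toNat, s = (i + (j : Int) + 1) % n) ↔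
      (if (s - i) % n = 0 then n else (s - i) % n) ≤ L := by
  have hd0 : 0 ≤ (s - i) % n := Int.emod_nonneg _ (by omega)
  have hdn : (s - i) % n < n := Int.emod_lt_of_pos _ hn
  constructor
  · rintro ⟨j, hj, hsj⟩
    have hkL : (j : Int) + 1 ≤ L := by omega
    have hdk : (s - i) % n = ((j : Int) + 1) % n := by
      calc (s - i) % n = (s % n - i % n) % n := by rw [Int.sub_emod]
      _ = ((i + (j : Int) + 1) % n % n - i % n) % n := by rw [hsj]
      _ = ((i + (j : Int) + 1) % n - i % n) % n := by
            rw [Int.emod_emod_of_dvd _ dvd_rfl]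
      _ = ((i + (j : Int) + 1) - i) % n := by rw [← Int.sub_emod]
      _ = ((j : Int) + 1) % n := by congr 1; ring
    by_cases hkn : (j : Int) + 1 < n
    · have hkk : ((j : Int) + 1) % n = (j : Int) + 1 :=
        Int.emod_eq_of_lt (by omega) hkn
      rw [hkk] at hdk
      split_ifs with h0 <;> omega
    · split_ifs with h0 <;> omega
  · intro hle
    have wit : ∀ t : Int, 1 ≤ t → t ≤ n → t % n = (s - i) % n → t ≤ L →
        ∃ j < L.toNat, s = (i + (j : Int) + 1) % n := by
      intro t ht1 htn htmod htL
      refine ⟨(t - 1).toNat, by omega, ?_⟩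
      have hcast : (((t - 1).toNat : Int)) = t - 1 := Int.toNat_of_nonneg (by omega)
      rw [hcast]
      have harg : i + (t - 1) + 1 = i + t := by ring
      rw [harg]
      calc s = s % n := (Int.emod_eq_of_lt hs0 hsn).symm
      _ = (i + (s - i)) % n := by congr 1; ring
      _ = (i % n + (s - i) % n % n) % n := by
            rw [Int.add_emod, Int.emod_emod_of_dvd _ dvd_rfl]
      _ = (i % n + t % n) % n := by
            rw [Int.emod_emod_of_dvd _ dvd_rfl, htmod]
      _ = (i + t) % n := by rw [← Int.add_emod]
    by_cases h0 : (s - i) % n = 0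
    · rw [if_pos h0] at hle
      exact wit n (by omega) le_rfl (by simp [h0]) hle
    · rw [if_neg h0] at hle
      exact wit _ (by omega) (by omega) (Int.emod_eq_of_lt hd0 hdn) hle

theorem g_elem_bounds (n : Int) (hn : 0 < n) (m : Nat) (r : Int) (x : Int)
    (hx : x ∈ gInner n m r) : 0 ≤ x ∧ x < n := by
  rw [mem_g_iff n x hn m r] at hx
  obtain ⟨j, _, hj⟩ := hx
  exact hj ▸ ⟨Int.emod_nonneg _ (by omega), Int.emod_lt_of_pos _ hn⟩

-- ===== VERDICT (by name: the statement is the Claim_ definition above) =====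
theorem get_redundant_user_stage_ids_spec : Claim_equal_get_redundant_user_stage_ids := by
  intro L s n _
  unfold Spec_get_redundant_user_stage_ids
  unfold get_redundant_user_stage_ids get_redundant_user_stage_ids_alt
  by_cases hn : n ≤ 0
  · simp [hn, PySem.List.pyRange_one_eq_nil]
  · replace hn : 0 < n := by omega
    by_cases hs : 0 ≤ s ∧ s < n
    · rw [if_neg (by omega)]
      simp only [inner_eq_g]
      rw [PySem.List.foldl_append_ite_eq_filter, PySem.List.foldl_append_ite_eq_filter]
      simp only [List.nil_append]
      apply List.filter_congr
      intro i hi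
      rw [PySem.List.mem_pyRange_one] at hi
      simp only [decide_eq_decide]
      rw [mem_g_iff n s hn L.toNat i,
        key_iff n s i L hn hs.1 hs.2,
        PySem.Int.mod_eq_emod_of_pos hn]
    · rw [if_pos (by tauto)]
      simp only [inner_eq_g]
      rw [PySem.List.foldl_append_ite_eq_filter]
      simp only [List.nil_append, List.filter_eq_nil_iff]
      intro i _
      simp only [decide_eq_true_eq]
      intro hmem
      exact hs ⟨(g_elem_bounds n hn _ _ _ hmem).1, (g_elem_bounds n hn _ _ _ hmem).2⟩
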